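-- pv_equiv track=rewrite | github.com/tommotom/LeetCode | Contest/Weekly-Contest-238/1.py | sumBase
-- ===== SOURCE A (Python) =====
-- def sumBase(n: int, k: int) -> int:
--     m = 0
--     while k ** m <= n: m += 1
--     m -= 1
--
--     ans = 0
--     while n > 0:
--         tmp = n // (k ** m)
--         n -= (k ** m) * tmp
--         ans += tmp
--         m -= 1
--
--     return ans
-- ===== SOURCE B (Python) =====
-- def sumBase(n: int, k: int) -> int:
--     ans = 0
--     while n > 0:
--         ans += n % k
--         n //= k
--     return ans
-- ===== Notes on version B (the rewrite author's own statement) =====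
-- stated objective: simpler
-- what changed: Drops A's magnitude-finding prefix loop and its MSB-first extraction with repeated exponentiation; B sums the digits in one least-significant-first pass with n % k and n //= k.
-- outside the precondition, e.g. on sumBase(6, -2): A returns -1, B returns 0
import Mathlib
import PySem

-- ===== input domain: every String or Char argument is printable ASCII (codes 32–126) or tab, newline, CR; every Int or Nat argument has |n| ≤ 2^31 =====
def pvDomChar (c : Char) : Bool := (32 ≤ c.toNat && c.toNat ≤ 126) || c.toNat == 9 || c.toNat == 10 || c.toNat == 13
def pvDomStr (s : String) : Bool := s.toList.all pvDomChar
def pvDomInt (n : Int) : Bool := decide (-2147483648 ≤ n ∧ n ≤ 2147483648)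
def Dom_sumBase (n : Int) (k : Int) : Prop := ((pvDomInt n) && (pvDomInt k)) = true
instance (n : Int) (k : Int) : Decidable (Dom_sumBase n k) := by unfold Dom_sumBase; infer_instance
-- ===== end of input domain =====

-- B replaces A's magnitude-finding loop + MSB-first extraction by one LSB-first pass summing n % k.

-- ===== PORT A =====
-- first while loop: m = 0; while k ** m <= n: m += 1   (fuel 64 suffices on Pre_: k ≥ 2, n ≤ 2^31)
def sumBaseLoop1 (n k : Int) (m : Nat) (fuel : Nat) : Nat :=
  match fuel with
  | 0 => m
  | fuel + 1 => if k ^ m ≤ n then sumBaseLoop1 n k (m + 1) fuel else m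

-- second while loop: while n > 0: tmp = n // k**m; n -= k**m * tmp; ans += tmp; m -= 1
-- (m stays ≥ 0 while n > 0 on Pre_, so k ** m is ported as k ^ m.toNat)
def sumBaseLoop2 (k : Int) (n m ans : Int) (fuel : Nat) : Int :=
  match fuel with
  | 0 => ans
  | fuel + 1 =>
    if 0 < n then
      let tmp := PySem.Int.floordiv n (k ^ m.toNat)
      sumBaseLoop2 k (n - (k ^ m.toNat) * tmp) (m - 1) (ans + tmp) fuel
    else ans

def sumBase (n : Int) (k : Int) : Int :=
  let m : Int := (sumBaseLoop1 n k 0 64 : Int) - 1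
  sumBaseLoop2 k n m 0 64

-- ===== PORT B =====
-- while n > 0: ans += n % k; n //= k   (fuel 64 suffices on Pre_)
def sumBaseAltLoop (k : Int) (n ans : Int) (fuel : Nat) : Int :=
  match fuel with
  | 0 => ans
  | fuel + 1 =>
    if 0 < n then sumBaseAltLoop k (PySem.Int.floordiv n k) (ans + PySem.Int.mod n k) fuel
    else ans

def sumBase_alt (n : Int) (k : Int) : Int := sumBaseAltLoop k n 0 64

-- ===== PRECONDITION & SPEC =====
-- Pre_ admits the natural domain k ≥ 2 plus all n ≤ 0 (both return 0 there for every k):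
-- for k ∈ {0,1} A's first loop diverges whenever n ≥ 1, and for negative k with n ≥ 1 the
-- alternating powers make A's returned value accidental (see claim cites).
def Pre_sumBase (n : Int) (k : Int) : Prop := 2 ≤ k ∨ n ≤ 0
instance (n : Int) (k : Int) : Decidable (Pre_sumBase n k) := by unfold Pre_sumBase; infer_instance
def pvWitness_sumBase : Int × Int := (34, 6)

def Spec_sumBase (n : Int) (k : Int) (out : Int) : Prop := out = sumBase_alt n k
instance (n : Int) (k : Int) (out : Int) : Decidable (Spec_sumBase n k out) := by unfold Spec_sumBase; infer_instance

-- ===== CLAIM (what is proved, stated in full; the proofs are below) =====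
def Claim_equal_sumBase : Prop := ∀ (n : Int) (k : Int), Dom_sumBase n k → Pre_sumBase n k → Spec_sumBase n k (sumBase n k)

-- ===== LEMMAS AND PROOFS =====

-- digit sum of a natural number in base k (k ≥ 2), LSB-first; reference value both ports equal
def dsumN (k : Nat) (n : Nat) : Nat :=
  if h : 2 ≤ k ∧ 0 < n then n % k + dsumN k (n / k) else 0
termination_by n
decreasing_by exact Nat.div_lt_self h.2 (by omega)

theorem dsumN_eq (k n : Nat) (hk : 2 ≤ k) : dsumN k n = n % k + dsumN k (n / k) := by
  rcases Nat.eq_zero_or_pos n with h | h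
  · subst h
    rw [dsumN, dsumN]; simp
  · rw [dsumN]; simp [hk, h]

theorem dsumN_lt (k n : Nat) (hk : 2 ≤ k) (hn : n < k) : dsumN k n = n := by
  rw [dsumN_eq k n hk, Nat.mod_eq_of_lt hn, Nat.div_eq_of_lt hn]
  rw [dsumN]; simp

-- peeling the leading digit: dsumN (q·k^e + r) = q + dsumN r for q < k, r < k^e
theorem dsumN_msb (k : Nat) (hk : 2 ≤ k) :
    ∀ (e q r : Nat), q < k → r < k ^ e → dsumN k (q * k ^ e + r) = q + dsumN k r := by
  intro e
  induction e with
  | zero =>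
    intro q r hq hr
    have hr0 : r = 0 := by
      have : k ^ 0 = 1 := pow_zero k
      omega
    subst hr0
    have h1 : dsumN k 0 = 0 := by rw [dsumN]; simp
    simp [dsumN_lt k q hk hq, h1]
  | succ e ih =>
    intro q r hq hr
    have hkpos : 0 < k := by omega
    have harr : q * k ^ (e + 1) + r = r + (q * k ^ e) * k := by ring
    have hmod : (q * k ^ (e + 1) + r) % k = r % k := by
      rw [harr, Nat.add_mul_mod_self_right]
    have hdiv : (q * k ^ (e + 1) + r) / k = q * k ^ e + r / k := by
      rw [harr, Nat.add_mul_div_right _ _ hkpos, Nat.add_comm]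
    have hr' : r / k < k ^ e := by
      refine (Nat.div_lt_iff_lt_mul hkpos).2 ?_
      rw [pow_succ] at hr
      exact hr
    rw [dsumN_eq k _ hk, hmod, hdiv, ih q (r / k) hq hr', dsumN_eq k r hk]
    omega

-- floordiv/mod on nonnegative dividend, positive divisor, via toNat
theorem floordiv_toNat (n k : Int) (hn : 0 ≤ n) (hk : 0 < k) :
    PySem.Int.floordiv n k = ((n.toNat / k.toNat : Nat) : Int) := by
  conv_lhs => rw [← Int.toNat_of_nonneg hn, ← Int.toNat_of_nonneg (le_of_lt hk)]
  exact PySem.Int.floordiv_natCast n.toNat k.toNat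

theorem mod_toNat (n k : Int) (hn : 0 ≤ n) (hk : 0 < k) :
    PySem.Int.mod n k = ((n.toNat % k.toNat : Nat) : Int) := by
  conv_lhs => rw [← Int.toNat_of_nonneg hn, ← Int.toNat_of_nonneg (le_of_lt hk)]
  exact PySem.Int.mod_natCast n.toNat k.toNat

-- B's loop computes the digit sum
theorem altLoop_eq (k : Int) (hk : 2 ≤ k) :
    ∀ (fuel : Nat) (n ans : Int), n.toNat < 2 ^ fuel →
      sumBaseAltLoop k n ans fuel = ans + (dsumN k.toNat n.toNat : Int) := by
  intro fuel
  induction fuel with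
  | zero =>
    intro n ans h
    have h0 : n.toNat = 0 := by omega
    rw [sumBaseAltLoop, h0, dsumN]
    simp
  | succ fuel ih =>
    intro n ans h
    by_cases hn : 0 < n
    · have hn0 : 0 ≤ n := le_of_lt hn
      have hk0 : 0 < k := by omega
      rw [sumBaseAltLoop, if_pos hn, floordiv_toNat n k hn0 hk0, mod_toNat n k hn0 hk0]
      have hk2 : 2 ≤ k.toNat := by omega
      have hb : (((n.toNat / k.toNat : Nat) : Int)).toNat < 2 ^ fuel := by
        rw [Int.toNat_natCast]
        have h1 : n.toNat / k.toNat ≤ n.toNat / 2 := Nat.div_le_div_left hk2 (by omega)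
        have h3 : 2 ^ (fuel + 1) = 2 ^ fuel * 2 := pow_succ 2 fuel
        omega
      rw [ih _ _ hb, Int.toNat_natCast, dsumN_eq k.toNat n.toNat hk2]
      push_cast; ring
    · rw [sumBaseAltLoop, if_neg hn]
      have : n.toNat = 0 := by omega
      rw [this, dsumN]; simp

-- A's second loop computes the digit sum, given the magnitude invariant n < k^(m+1)
theorem loop2_eq (k : Int) (hk : 2 ≤ k) :
    ∀ (m : Nat) (fuel : Nat) (n ans : Int), 0 ≤ n → n < k ^ (m + 1) → m + 2 ≤ fuel →
      sumBaseLoop2 k n (m : Int) ans fuel = ans + (dsumN k.toNat n.toNat : Int) := by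
  intro m
  induction m with
  | zero =>
    intro fuel n ans hn0 hn1 hf
    match fuel, hf with
    | fuel + 2, _ =>
      by_cases hn : 0 < n
      · rw [sumBaseLoop2, if_pos hn]
        have hfd : PySem.Int.floordiv n 1 = n := by
          rw [PySem.Int.floordiv_eq_ediv_of_pos (by omega)]; simp
        simp only [Int.toNat_natCast, pow_zero, hfd]
        have h0 : n - 1 * n = 0 := by ring
        rw [h0, sumBaseLoop2, if_neg (by omega)]
        have hnk : n.toNat < k.toNat := by
          have : n < k := by rw [pow_one] at hn1; exact hn1
          omega
        rw [dsumN_lt k.toNat n.toNat (by omega) hnk]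
        omega
      · rw [sumBaseLoop2, if_neg hn]
        have : n.toNat = 0 := by omega
        rw [this, dsumN]; simp
  | succ m ih =>
    intro fuel n ans hn0 hn1 hf
    match fuel, hf with
    | fuel + 1, hf =>
      by_cases hn : 0 < n
      · rw [sumBaseLoop2, if_pos hn]
        have hkpos : (0 : Int) < k := by omega
        have hKpos : (0 : Int) < k ^ (m + 1) := pow_pos hkpos _
        have tmp_def : PySem.Int.floordiv n (k ^ (m + 1)) = n / (k ^ (m + 1)) :=
          PySem.Int.floordiv_eq_ediv_of_pos hKpos
        simp only [Int.toNat_natCast, tmp_def]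
        have hmod : n - k ^ (m + 1) * (n / k ^ (m + 1)) = n % k ^ (m + 1) := by
          rw [Int.emod_def]
        have hmsucc : ((m + 1 : Nat) : Int) - 1 = (m : Int) := by push_cast; ring
        rw [hmod, hmsucc]
        have hr0 : 0 ≤ n % k ^ (m + 1) := Int.emod_nonneg n (by positivity)
        have hr1 : n % k ^ (m + 1) < k ^ (m + 1) := Int.emod_lt_of_pos n hKpos
        rw [ih fuel (n % k ^ (m + 1)) (ans + n / k ^ (m + 1)) hr0 hr1 (by omega)]
        -- remaining: leading-digit peel
        have hq0 : 0 ≤ n / k ^ (m + 1) := Int.ediv_nonneg hn0 (le_of_lt hKpos)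
        have hqk : n / k ^ (m + 1) < k := by
          have hlt : n < k * k ^ (m + 1) := by
            rw [← pow_succ']
            exact hn1
          exact Int.ediv_lt_of_lt_mul hKpos hlt
        have hdecomp : n = (n / k ^ (m + 1)) * k ^ (m + 1) + n % k ^ (m + 1) := by
          rw [Int.emod_def]; ring
        have hkt : ((k.toNat : Int)) = k := Int.toNat_of_nonneg (by omega)
        have h1 : (((n / k ^ (m + 1)).toNat : Int)) = n / k ^ (m + 1) := Int.toNat_of_nonneg hq0
        have h2 : (((n % k ^ (m + 1)).toNat : Int)) = n % k ^ (m + 1) := Int.toNat_of_nonneg hr0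
        have h3 : ((n.toNat : Int)) = n := Int.toNat_of_nonneg hn0
        have hnat : n.toNat = (n / k ^ (m + 1)).toNat * k.toNat ^ (m + 1) + (n % k ^ (m + 1)).toNat := by
          refine Int.natCast_inj.mp ?_
          push_cast [h1, h2, h3, hkt]
          linarith [hdecomp]
        have hktn : 2 ≤ k.toNat := by omega
        have hrKn : (n % k ^ (m + 1)).toNat < k.toNat ^ (m + 1) := by
          have hc : (((n % k ^ (m + 1)).toNat : Int)) < (((k.toNat ^ (m + 1) : Nat)) : Int) := by
            push_cast [hkt]
            rw [h2]
            exact hr1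
          exact_mod_cast hc
        have hqkn : (n / k ^ (m + 1)).toNat < k.toNat := by omega
        rw [hnat, dsumN_msb k.toNat hktn (m + 1) _ _ hqkn hrKn]
        push_cast [h1]
        ring
      · rw [sumBaseLoop2, if_neg hn]
        have : n.toNat = 0 := by omega
        rw [this, dsumN]; simp

-- first loop: result bound and postcondition n < k^result
theorem loop1_le (n k : Int) :
    ∀ (fuel m j : Nat), j ≤ fuel → n < k ^ (m + j) →
      sumBaseLoop1 n k m fuel ≤ m + j ∧ n < k ^ (sumBaseLoop1 n k m fuel) := by
  intro fuel
  induction fuel with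
  | zero => intro m j hj h; interval_cases j; exact ⟨le_refl _, by simpa using h⟩
  | succ fuel ih =>
    intro m j hj h
    rw [sumBaseLoop1]
    by_cases hc : k ^ m ≤ n
    · rw [if_pos hc]
      match j with
      | 0 => exact absurd h (by simpa using hc)
      | j + 1 =>
        have := ih (m + 1) j (by omega) (by rw [show m + 1 + j = m + (j + 1) by omega]; exact h)
        exact ⟨by omega, this.2⟩
    · rw [if_neg hc]; exact ⟨by omega, by omega⟩

theorem loop1_ge (n k : Int) : ∀ (fuel m : Nat), m ≤ sumBaseLoop1 n k m fuel := by
  intro fuel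
  induction fuel with
  | zero => intro m; rw [sumBaseLoop1]
  | succ fuel ih =>
    intro m
    rw [sumBaseLoop1]
    by_cases hc : k ^ m ≤ n
    · rw [if_pos hc]; have := ih (m + 1); omega
    · rw [if_neg hc]

-- ===== VERDICT (by name: the statement is the Claim_ definition above) =====
theorem sumBase_spec : Claim_equal_sumBase := by
  intro n k hdom hpre
  unfold Spec_sumBase sumBase sumBase_alt
  by_cases hn : 0 < n
  case neg =>
    rw [sumBaseLoop2, if_neg hn, sumBaseAltLoop, if_neg hn]
  have hk : 2 ≤ k := by
    rcases hpre with h | h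
    · exact h
    · omega
  have hnbound : n ≤ 2147483648 := by
    unfold Dom_sumBase pvDomInt at hdom
    simp at hdom; omega
  have hpow33 : n < k ^ (0 + 33) := by
    calc n ≤ 2147483648 := hnbound
    _ < 2 ^ 33 := by norm_num
    _ ≤ k ^ 33 := pow_le_pow_left₀ (by norm_num) hk 33
  obtain ⟨hM1, hM2⟩ := loop1_le n k 64 0 33 (by omega) hpow33
  set M := sumBaseLoop1 n k 0 64 with hMdef
  -- M ≥ 1 since k^0 = 1 ≤ n makes the first loop step
  have hMpos : 1 ≤ M := by
    rw [hMdef, sumBaseLoop1, if_pos (by simpa using hn)]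
    exact loop1_ge n k 63 1
  have hMeq : ((M : Int)) - 1 = ((M - 1 : Nat) : Int) := by omega
  rw [hMeq]
  have hinv : n < k ^ ((M - 1) + 1) := by
    have hM : M - 1 + 1 = M := by omega
    rw [hM]; exact hM2
  rw [loop2_eq k hk (M - 1) 64 n 0 (le_of_lt hn) hinv (by omega)]
  rw [altLoop_eq k hk 64 n 0 (by omega)]
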